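-- pv_equiv track=rewrite | github.com/JanBargeman/Thesis-FE-SP | spoef/ING/all_functions.py | calc_contingency_table
-- ===== SOURCE A (Python) =====
-- def calc_contingency_table(valid, pred1, pred2):
--     a = 0
--     b = 0
--     c = 0
--     d = 0
--     for i in range(len(pred1)):
--         if valid[i] == 1 and pred1[i] == 1 and pred2[i] == 1:
--             a = a + 1
--         elif valid[i] == 0 and pred1[i] == 0 and pred2[i] == 0:
--             a = a + 1
--         elif valid[i] == 1 and pred1[i] == 1 and pred2[i] == 0:
--             b = b + 1
--         elif valid[i] == 0 and pred1[i] == 0 and pred2[i] == 1: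
--             b = b + 1
--         elif valid[i] == 1 and pred1[i] == 0 and pred2[i] == 1:
--             c = c + 1
--         elif valid[i] == 0 and pred1[i] == 1 and pred2[i] == 0:
--             c = c + 1
--         elif valid[i] == 1 and pred1[i] == 0 and pred2[i] == 0:
--             d = d + 1
--         elif valid[i] == 0 and pred1[i] == 1 and pred2[i] == 1:
--             d = d + 1
--         else:
--             raise ValueError("Contingency table error.")
--
--     return a,b,c,d
-- ===== SOURCE B (Python) =====
-- def calc_contingency_table(valid, pred1, pred2):
--     n = len(pred1)
--     for i in range(n):
--         if valid[i] not in (0, 1) or pred1[i] not in (0, 1) or pred2[i] not in (0, 1):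
--             raise ValueError("Contingency table error.")
--     m1 = sum(1 for i in range(n) if pred1[i] == valid[i])
--     m2 = sum(1 for i in range(n) if pred2[i] == valid[i])
--     m12 = sum(1 for i in range(n) if pred1[i] == valid[i] and pred2[i] == valid[i])
--     return m12, m1 - m12, m2 - m12, n - m1 - m2 + m12
-- ===== Notes on version B (the rewrite author's own statement) =====
-- stated objective: alternative
-- what changed: Replaces A's single pass with an 8-way branch accumulating four counters by a validation pass followed by counting per-model correctness totals (m1, m2, m12) and deriving the four cells by inclusion-exclusion arithmetic.
import Mathlib
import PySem

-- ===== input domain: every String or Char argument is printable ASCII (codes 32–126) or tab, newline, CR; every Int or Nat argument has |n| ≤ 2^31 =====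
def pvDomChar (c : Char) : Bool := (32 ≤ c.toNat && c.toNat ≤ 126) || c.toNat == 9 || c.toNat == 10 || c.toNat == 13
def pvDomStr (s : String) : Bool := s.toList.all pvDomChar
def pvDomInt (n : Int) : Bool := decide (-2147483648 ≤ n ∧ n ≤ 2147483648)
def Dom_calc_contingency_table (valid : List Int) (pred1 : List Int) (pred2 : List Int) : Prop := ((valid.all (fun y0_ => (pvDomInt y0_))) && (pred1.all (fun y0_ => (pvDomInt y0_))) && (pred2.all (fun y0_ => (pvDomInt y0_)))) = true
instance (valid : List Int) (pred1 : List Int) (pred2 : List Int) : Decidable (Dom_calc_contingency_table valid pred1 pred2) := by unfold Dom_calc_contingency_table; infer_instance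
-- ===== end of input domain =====

-- B replaces A's single-pass 8-way branch by a validation pass plus inclusion-exclusion
-- over per-model correctness counts (m1, m2, m12); same O(n) cost, a different decomposition.


-- ===== PORT A =====
-- one loop iteration of A: the 8-way elif chain; none = the ValueError / IndexError path
def ccA_step (valid : List Int) (pred1 : List Int) (pred2 : List Int)
    (st : Option (Int × Int × Int × Int)) (i : Nat) : Option (Int × Int × Int × Int) :=
  match st with
  | none => none
  | some (a, b, c, d) =>
    match PySem.List.pyGet? valid (i : Int), PySem.List.pyGet? pred1 (i : Int),
          PySem.List.pyGet? pred2 (i : Int) with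
    | some v, some p, some q =>
      if v = 1 ∧ p = 1 ∧ q = 1 then some (a + 1, b, c, d)
      else if v = 0 ∧ p = 0 ∧ q = 0 then some (a + 1, b, c, d)
      else if v = 1 ∧ p = 1 ∧ q = 0 then some (a, b + 1, c, d)
      else if v = 0 ∧ p = 0 ∧ q = 1 then some (a, b + 1, c, d)
      else if v = 1 ∧ p = 0 ∧ q = 1 then some (a, b, c + 1, d)
      else if v = 0 ∧ p = 1 ∧ q = 0 then some (a, b, c + 1, d)
      else if v = 1 ∧ p = 0 ∧ q = 0 then some (a, b, c, d + 1)
      else if v = 0 ∧ p = 1 ∧ q = 1 then some (a, b, c, d + 1)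
      else none
    | _, _, _ => none

def calc_contingency_table (valid : List Int) (pred1 : List Int) (pred2 : List Int) :
    Int × Int × Int × Int :=
  (((List.range pred1.length).foldl (ccA_step valid pred1 pred2) (some (0, 0, 0, 0)))).getD
    (0, 0, 0, 0)

-- ===== PORT B =====
-- the validation loop: each of valid[i], pred1[i], pred2[i] must exist and be 0 or 1
-- (a failed lookup or a value outside {0,1} = B's raise path, modelled as check failure)
def ccB_ok (x : Option Int) : Bool := x == some 0 || x == some 1

def ccB_check (valid : List Int) (pred1 : List Int) (pred2 : List Int) : Bool :=
  (List.range pred1.length).all (fun (i : Nat) =>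
    ccB_ok (PySem.List.pyGet? valid (i : Int)) &&
    ccB_ok (PySem.List.pyGet? pred1 (i : Int)) &&
    ccB_ok (PySem.List.pyGet? pred2 (i : Int)))

-- the three counting comprehensions (after a successful check every lookup is some _,
-- so option equality is exactly the Python '==' on the elements)
def ccB_m1 (valid : List Int) (pred1 : List Int) : Int :=
  ((List.range pred1.length).countP (fun (i : Nat) =>
    PySem.List.pyGet? pred1 (i : Int) == PySem.List.pyGet? valid (i : Int)) : Nat)

def ccB_m2 (valid : List Int) (pred1 : List Int) (pred2 : List Int) : Int :=
  ((List.range pred1.length).countP (fun (i : Nat) =>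
    PySem.List.pyGet? pred2 (i : Int) == PySem.List.pyGet? valid (i : Int)) : Nat)

def ccB_m12 (valid : List Int) (pred1 : List Int) (pred2 : List Int) : Int :=
  ((List.range pred1.length).countP (fun (i : Nat) =>
    PySem.List.pyGet? pred1 (i : Int) == PySem.List.pyGet? valid (i : Int) &&
    PySem.List.pyGet? pred2 (i : Int) == PySem.List.pyGet? valid (i : Int)) : Nat)

def calc_contingency_table_alt (valid : List Int) (pred1 : List Int) (pred2 : List Int) :
    Int × Int × Int × Int :=
  if ccB_check valid pred1 pred2 then
    let n : Int := (pred1.length : Nat)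
    let m1 := ccB_m1 valid pred1
    let m2 := ccB_m2 valid pred1 pred2
    let m12 := ccB_m12 valid pred1 pred2
    (m12, m1 - m12, m2 - m12, n - m1 - m2 + m12)
  else (0, 0, 0, 0)  -- raise path

-- ===== PRECONDITION & SPEC =====
-- Pre_ = exactly the inputs where A returns: indices 0..len(pred1)-1 exist in all three
-- lists (else IndexError) and every accessed value is 0 or 1 (else ValueError).
def Pre_calc_contingency_table (valid : List Int) (pred1 : List Int) (pred2 : List Int) : Prop :=
  pred1.length ≤ valid.length ∧ pred1.length ≤ pred2.length ∧
  (∀ x ∈ valid.take pred1.length, x = 0 ∨ x = 1) ∧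
  (∀ x ∈ pred1, x = 0 ∨ x = 1) ∧
  (∀ x ∈ pred2.take pred1.length, x = 0 ∨ x = 1)

instance (valid : List Int) (pred1 : List Int) (pred2 : List Int) :
    Decidable (Pre_calc_contingency_table valid pred1 pred2) := by
  unfold Pre_calc_contingency_table; infer_instance

def pvWitness_calc_contingency_table : List Int × List Int × List Int :=
  ([1, 0, 1, 0], [1, 1, 0, 1], [1, 0, 0, 0])

def Spec_calc_contingency_table (valid : List Int) (pred1 : List Int) (pred2 : List Int) (out : Int × Int × Int × Int) : Prop := out = calc_contingency_table_alt valid pred1 pred2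
instance (valid : List Int) (pred1 : List Int) (pred2 : List Int) (out : Int × Int × Int × Int) : Decidable (Spec_calc_contingency_table valid pred1 pred2 out) := by unfold Spec_calc_contingency_table; infer_instance

-- ===== CLAIM (what is proved, stated in full; the proofs are below) =====
def Claim_equal_calc_contingency_table : Prop := ∀ (valid : List Int) (pred1 : List Int) (pred2 : List Int), Dom_calc_contingency_table valid pred1 pred2 → Pre_calc_contingency_table valid pred1 pred2 → Spec_calc_contingency_table valid pred1 pred2 (calc_contingency_table valid pred1 pred2)

-- ===== LEMMAS AND PROOFS =====

theorem ccWitness_pre :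
    Dom_calc_contingency_table pvWitness_calc_contingency_table.1
      pvWitness_calc_contingency_table.2.1 pvWitness_calc_contingency_table.2.2 ∧
    Pre_calc_contingency_table pvWitness_calc_contingency_table.1
      pvWitness_calc_contingency_table.2.1 pvWitness_calc_contingency_table.2.2 := by
  decide

-- entries accessed by the loop are 0/1, under Pre_
theorem cc_entries (valid pred1 pred2 : List Int)
    (hpre : Pre_calc_contingency_table valid pred1 pred2) (i : Nat) (hi : i < pred1.length) :
    ∃ hv' : i < valid.length, ∃ hq' : i < pred2.length,
      (valid[i] = 0 ∨ valid[i] = 1) ∧ (pred1[i] = 0 ∨ pred1[i] = 1) ∧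
      (pred2[i] = 0 ∨ pred2[i] = 1) := by
  obtain ⟨hlv, hlq, h1, h2, h3⟩ := hpre
  have hiv : i < valid.length := lt_of_lt_of_le hi hlv
  have hiq : i < pred2.length := lt_of_lt_of_le hi hlq
  refine ⟨hiv, hiq, ?_, h2 _ (List.getElem_mem hi), ?_⟩
  · refine h1 _ ?_
    have : (valid.take pred1.length)[i]'(by simp [hiv, hi]) = valid[i] := List.getElem_take
    exact this ▸ List.getElem_mem _
  · refine h3 _ ?_
    have : (pred2.take pred1.length)[i]'(by simp [hiq, hi]) = pred2[i] := List.getElem_take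
    exact this ▸ List.getElem_mem _

-- counts over range k, as partial sums (Int-valued)
def ccM1 (valid pred1 : List Int) (k : Nat) : Int :=
  ((List.range k).countP (fun (i : Nat) =>
    PySem.List.pyGet? pred1 (i : Int) == PySem.List.pyGet? valid (i : Int)) : Nat)
def ccM2 (valid _pred1 pred2 : List Int) (k : Nat) : Int :=
  ((List.range k).countP (fun (i : Nat) =>
    PySem.List.pyGet? pred2 (i : Int) == PySem.List.pyGet? valid (i : Int)) : Nat)
def ccM12 (valid pred1 pred2 : List Int) (k : Nat) : Int :=
  ((List.range k).countP (fun (i : Nat) =>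
    PySem.List.pyGet? pred1 (i : Int) == PySem.List.pyGet? valid (i : Int) &&
    PySem.List.pyGet? pred2 (i : Int) == PySem.List.pyGet? valid (i : Int)) : Nat)

-- main invariant: A's fold up to k equals the inclusion-exclusion formula at k
theorem cc_fold_eq (valid pred1 pred2 : List Int)
    (hpre : Pre_calc_contingency_table valid pred1 pred2) (k : Nat) (hk : k ≤ pred1.length) :
    (List.range k).foldl (ccA_step valid pred1 pred2) (some (0, 0, 0, 0)) =
      some (ccM12 valid pred1 pred2 k,
            ccM1 valid pred1 k - ccM12 valid pred1 pred2 k,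
            ccM2 valid pred1 pred2 k - ccM12 valid pred1 pred2 k,
            (k : Int) - ccM1 valid pred1 k - ccM2 valid pred1 pred2 k
              + ccM12 valid pred1 pred2 k) := by
  induction k with
  | zero => simp [ccM1, ccM2, ccM12]
  | succ k ih =>
    have hk' : k ≤ pred1.length := Nat.le_of_succ_le hk
    obtain ⟨hiv, hiq, hv, hp, hq⟩ := cc_entries valid pred1 pred2 hpre k (by omega)
    have gv : PySem.List.pyGet? valid (k : Int) = some valid[k] := by
      simp [PySem.List.pyGet?_natCast, List.getElem?_eq_getElem hiv]
    have hk2 : k < pred1.length := by omega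
    have gp : PySem.List.pyGet? pred1 (k : Int) = some pred1[k] := by
      simp [PySem.List.pyGet?_natCast, List.getElem?_eq_getElem hk2]
    have gq : PySem.List.pyGet? pred2 (k : Int) = some pred2[k] := by
      simp [PySem.List.pyGet?_natCast, List.getElem?_eq_getElem hiq]
    have e1 : ccM1 valid pred1 (k + 1) =
        ccM1 valid pred1 k + (if pred1[k] = valid[k] then 1 else 0) := by
      unfold ccM1
      rw [List.range_succ, List.countP_append]
      by_cases hc : pred1[k] = valid[k] <;>
        simp [List.countP_cons, List.getElem?_eq_getElem, hk2, hiv, hc]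
    have e2 : ccM2 valid pred1 pred2 (k + 1) =
        ccM2 valid pred1 pred2 k + (if pred2[k] = valid[k] then 1 else 0) := by
      unfold ccM2
      rw [List.range_succ, List.countP_append]
      by_cases hc : pred2[k] = valid[k] <;>
        simp [List.countP_cons, List.getElem?_eq_getElem, hiq, hiv, hc]
    have e12 : ccM12 valid pred1 pred2 (k + 1) =
        ccM12 valid pred1 pred2 k +
          (if pred1[k] = valid[k] ∧ pred2[k] = valid[k] then 1 else 0) := by
      unfold ccM12
      rw [List.range_succ, List.countP_append]
      by_cases hc : pred1[k] = valid[k] <;> by_cases hc' : pred2[k] = valid[k] <;>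
        simp [List.countP_cons, List.getElem?_eq_getElem, hk2, hiv, hiq, hc, hc']
    rw [List.range_succ, List.foldl_append, ih hk']
    simp only [List.foldl_cons, List.foldl_nil]
    rw [e1, e2, e12]
    rcases hv with hv | hv <;> rcases hp with hp | hp <;> rcases hq with hq | hq <;>
      · simp [ccA_step, gv, gp, gq, hv, hp, hq, Option.some.injEq, Prod.mk.injEq]
        push_cast
        omega

-- Pre_ makes B's validation succeed
theorem cc_check_true (valid pred1 pred2 : List Int)
    (hpre : Pre_calc_contingency_table valid pred1 pred2) :
    ccB_check valid pred1 pred2 = true := by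
  unfold ccB_check
  rw [List.all_eq_true]
  intro i hi
  have hi' : i < pred1.length := List.mem_range.mp hi
  obtain ⟨hiv, hiq, hv, hp, hq⟩ := cc_entries valid pred1 pred2 hpre i hi'
  have gv : PySem.List.pyGet? valid (i : Int) = some valid[i] := by
    simp [PySem.List.pyGet?_natCast, List.getElem?_eq_getElem hiv]
  have gp : PySem.List.pyGet? pred1 (i : Int) = some pred1[i] := by
    simp [PySem.List.pyGet?_natCast, List.getElem?_eq_getElem hi']
  have gq : PySem.List.pyGet? pred2 (i : Int) = some pred2[i] := by
    simp [PySem.List.pyGet?_natCast, List.getElem?_eq_getElem hiq]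
  simp [ccB_ok, gv, gp, gq]
  rcases hv with h | h <;> rcases hp with h' | h' <;> rcases hq with h'' | h'' <;>
    simp [h, h', h'']

-- ===== VERDICT =====
theorem calc_contingency_table_spec : Claim_equal_calc_contingency_table := by
  intro valid pred1 pred2 _ hpre
  unfold Spec_calc_contingency_table calc_contingency_table calc_contingency_table_alt
  rw [cc_fold_eq valid pred1 pred2 hpre pred1.length le_rfl,
    cc_check_true valid pred1 pred2 hpre]
  simp [ccB_m1, ccB_m2, ccB_m12, ccM1, ccM2, ccM12]
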